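-- pv_equiv track=rewrite | github.com/ipsper/wazuh-loader | test_support/load_generator_utils.py | validate_log_format
-- ===== SOURCE A (Python) =====
-- from typing import List, Dict, Any
--
-- def validate_log_format(logs: List[str], expected_type: str) -> bool:
--     """Validera loggformat"""
--     if expected_type == "ssh":
--         return all("sshd[" in log for log in logs)
--     elif expected_type == "web":
--         return all("HTTP/1.1" in log for log in logs)
--     elif expected_type == "firewall":
--         return all("iptables" in log for log in logs)
--     elif expected_type == "system":
--         return all(any(keyword in log for keyword in ["systemd", "kernel", "cron", "sudo"]) for log in logs)
--     elif expected_type == "malware":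
--         return all(any(keyword in log for keyword in ["clamav", "malware_detector", "antivirus"]) for log in logs)
--     return False
-- ===== SOURCE B (Python) =====
-- FORMAT_KEYWORDS = {
--     "ssh": ["sshd["],
--     "web": ["HTTP/1.1"],
--     "firewall": ["iptables"],
--     "system": ["systemd", "kernel", "cron", "sudo"],
--     "malware": ["clamav", "malware_detector", "antivirus"],
-- }
--
-- def validate_log_format(logs, expected_type):
--     """Validera loggformat"""
--     # Candidate-elimination: start from all known formats, and let each log
--     # eliminate the formats it does not match; the answer is whether the
--     # expected format survives every log.
--     candidates = list(FORMAT_KEYWORDS)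
--     for log in logs:
--         candidates = [t for t in candidates
--                       if any(kw in log for kw in FORMAT_KEYWORDS[t])]
--         if not candidates:
--             break
--     return expected_type in candidates
-- ===== Notes on version B (the rewrite author's own statement) =====
-- stated objective: alternative
-- what changed: Instead of dispatching on expected_type and scanning logs for that one format's keywords (A's if/elif cascade), B runs candidate elimination: it starts from the set of all five known formats, each log filters out the formats whose keywords it fails to match (with early exit when none survive), and finally tests membership of expected_type among the surviving candidates; unknown types are never candidates, so they yield False.
import Mathlib
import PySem

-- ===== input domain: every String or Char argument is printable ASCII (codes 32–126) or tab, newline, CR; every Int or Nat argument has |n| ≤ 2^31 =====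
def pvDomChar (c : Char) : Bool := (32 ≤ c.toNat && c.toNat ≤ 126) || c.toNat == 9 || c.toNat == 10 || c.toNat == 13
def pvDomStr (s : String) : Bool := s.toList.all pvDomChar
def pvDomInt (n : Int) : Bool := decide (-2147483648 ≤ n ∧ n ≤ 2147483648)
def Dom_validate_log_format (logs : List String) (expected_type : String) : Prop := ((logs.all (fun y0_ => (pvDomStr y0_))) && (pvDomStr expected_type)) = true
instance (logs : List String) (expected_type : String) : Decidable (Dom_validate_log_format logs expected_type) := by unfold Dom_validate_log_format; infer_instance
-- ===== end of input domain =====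

-- B replaces A's dispatch-on-type cascade with candidate elimination: each log filters the set of surviving formats, then membership of expected_type is tested; objective: alternative.


-- ===== PORT A =====
def validate_log_format (logs : List String) (expected_type : String) : Bool :=
  if expected_type == "ssh" then
    logs.all (fun log => PySem.Str.isIn "sshd[" log)
  else if expected_type == "web" then
    logs.all (fun log => PySem.Str.isIn "HTTP/1.1" log)
  else if expected_type == "firewall" then
    logs.all (fun log => PySem.Str.isIn "iptables" log)
  else if expected_type == "system" then
    logs.all (fun log => (["systemd", "kernel", "cron", "sudo"] : List String).any (fun kw => PySem.Str.isIn kw log))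
  else if expected_type == "malware" then
    logs.all (fun log => (["clamav", "malware_detector", "antivirus"] : List String).any (fun kw => PySem.Str.isIn kw log))
  else
    false

-- ===== PORT B =====
-- the FORMAT_KEYWORDS table of Source B
def pvFormatKeywords : PySem.Dict String (List String) :=
  PySem.Dict.ofList [("ssh", ["sshd["]), ("web", ["HTTP/1.1"]), ("firewall", ["iptables"]),
    ("system", ["systemd", "kernel", "cron", "sudo"]),
    ("malware", ["clamav", "malware_detector", "antivirus"])]

-- FORMAT_KEYWORDS[t]; every t handed in is a key of the table, so the [] default is unreachable
def pvKwOf (t : String) : List String := pvFormatKeywords.getD t []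

-- the for-loop of Source B: filter the candidate formats by each log, early exit on empty
def pvElimLoop (cands : List String) (logs : List String) : List String :=
  match logs with
  | [] => cands
  | log :: rest =>
    let c' := cands.filter (fun t => (pvKwOf t).any (fun kw => PySem.Str.isIn kw log))
    if c'.isEmpty then c' else pvElimLoop c' rest

def validate_log_format_alt (logs : List String) (expected_type : String) : Bool :=
  (pvElimLoop (pvFormatKeywords.keys) logs).contains expected_type

-- ===== PRECONDITION & SPEC =====
def Spec_validate_log_format (logs : List String) (expected_type : String) (out : Bool) : Prop := out = validate_log_format_alt logs expected_type
instance (logs : List String) (expected_type : String) (out : Bool) : Decidable (Spec_validate_log_format logs expected_type out) := by unfold Spec_validate_log_format; infer_instance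

-- ===== CLAIM (what is proved, stated in full; the proofs are below) =====
def Claim_equal_validate_log_format : Prop := ∀ (logs : List String) (expected_type : String), Dom_validate_log_format logs expected_type → Spec_validate_log_format logs expected_type (validate_log_format logs expected_type)

-- ===== LEMMAS AND PROOFS =====

-- a format t survives the elimination loop iff it was a candidate and every log matches its keywords
theorem pvElimLoop_contains (logs : List String) (cands : List String) (t : String) :
    (pvElimLoop cands logs).contains t =
      (cands.contains t && logs.all (fun log => (pvKwOf t).any (fun kw => PySem.Str.isIn kw log))) := by
  have key : ∀ (c : List String) (p : String → Bool), (c.filter p).contains t = (c.contains t && p t) := by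
    intro c p
    simp [List.contains_eq_mem, List.mem_filter, Bool.decide_and]
  induction logs generalizing cands with
  | nil => simp [pvElimLoop]
  | cons log rest ih =>
    simp only [pvElimLoop, List.all_cons]
    split
    · next hemp =>
      rw [List.isEmpty_iff] at hemp
      have h2 : (cands.contains t && (pvKwOf t).any (fun kw => PySem.Str.isIn kw log)) = false := by
        rw [← key cands (fun t => (pvKwOf t).any (fun kw => PySem.Str.isIn kw log)), hemp]; rfl
      rw [hemp, ← Bool.and_assoc, h2, Bool.false_and]; rfl
    · rw [ih, key, Bool.and_assoc]

-- ===== VERDICT (by name: the statement is the Claim_ definition above) =====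
set_option maxRecDepth 4000 in
theorem validate_log_format_spec : Claim_equal_validate_log_format := by
  intro logs expected_type _
  unfold Spec_validate_log_format validate_log_format validate_log_format_alt
  rw [pvElimLoop_contains]
  have hkeys : pvFormatKeywords.keys = ["ssh", "web", "firewall", "system", "malware"] := by decide
  have hssh : pvKwOf "ssh" = ["sshd["] := by decide
  have hweb : pvKwOf "web" = ["HTTP/1.1"] := by decide
  have hfw : pvKwOf "firewall" = ["iptables"] := by decide
  have hsys : pvKwOf "system" = ["systemd", "kernel", "cron", "sudo"] := by decide
  have hmal : pvKwOf "malware" = ["clamav", "malware_detector", "antivirus"] := by decide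
  rw [hkeys]
  by_cases h1 : expected_type = "ssh" <;>
  by_cases h2 : expected_type = "web" <;>
  by_cases h3 : expected_type = "firewall" <;>
  by_cases h4 : expected_type = "system" <;>
  by_cases h5 : expected_type = "malware" <;>
  simp_all [List.contains_eq_mem]
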